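-- pv_equiv track=rewrite | github.com/sarbeshtiwari/arc-agi-3 | environment_files/rd01/rd01.py | _tile_border
-- ===== SOURCE A (Python) =====
-- def _make_tile(color, size):
--     return [[color] * size for _ in range(size)]
--
-- def _tile_border(inner, border, size):
--     if size <= 2:
--         return _make_tile(inner, size)
--     t = []
--     for r in range(size):
--         row = []
--         for c in range(size):
--             if r == 0 or r == size - 1 or c == 0 or c == size - 1:
--                 row.append(border)
--             else:
--                 row.append(inner)
--         t.append(row)
--     return t
-- ===== SOURCE B (Python) =====
-- def _make_tile(color, size):
--     return [[color] * size for _ in range(size)]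
--
-- def _tile_border(inner, border, size):
--     if size <= 2:
--         return _make_tile(inner, size)
--     # build from row templates: border row, then fresh middle rows, then border row
--     t = [[border] * size]
--     for _ in range(size - 2):
--         t.append([border] + [inner] * (size - 2) + [border])
--     t.append([border] * size)
--     return t
-- ===== Notes on version B (the rewrite author's own statement) =====
-- stated objective: simpler
-- what changed: B builds the grid per row from two templates (a full border row and a border+inner*(size-2)+border middle row) instead of A's per-cell nested loop with a four-way boundary test.
import Mathlib
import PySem

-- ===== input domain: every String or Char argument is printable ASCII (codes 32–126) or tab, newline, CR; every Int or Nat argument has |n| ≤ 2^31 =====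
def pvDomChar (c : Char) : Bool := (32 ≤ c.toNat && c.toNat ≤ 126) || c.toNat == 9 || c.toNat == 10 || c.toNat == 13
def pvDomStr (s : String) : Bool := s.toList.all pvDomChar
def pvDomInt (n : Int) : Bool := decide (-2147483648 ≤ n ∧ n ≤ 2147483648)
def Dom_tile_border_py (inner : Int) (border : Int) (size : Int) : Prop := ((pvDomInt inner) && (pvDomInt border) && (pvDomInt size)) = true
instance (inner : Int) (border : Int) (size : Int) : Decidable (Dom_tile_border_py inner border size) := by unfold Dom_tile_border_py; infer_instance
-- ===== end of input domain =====

-- B builds the grid per row from two templates instead of A's per-cell boundary test; objective: simpler.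

-- ===== PORT A =====
-- _make_tile(color, size): [[color] * size for _ in range(size)]
def pvMakeTile (color : Int) (size : Int) : List (List Int) :=
  (PySem.List.pyRange 0 size 1).map (fun _ => List.replicate size.toNat color)

def tile_border_py (inner : Int) (border : Int) (size : Int) : List (List Int) :=
  if size ≤ 2 then pvMakeTile inner size
  else
    (PySem.List.pyRange 0 size 1).foldl (fun t r =>
      t ++ [(PySem.List.pyRange 0 size 1).foldl (fun row c =>
        row ++ [if r = 0 ∨ r = size - 1 ∨ c = 0 ∨ c = size - 1 then border else inner]) []]) []

-- ===== PORT B =====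
def tile_border_py_alt (inner : Int) (border : Int) (size : Int) : List (List Int) :=
  if size ≤ 2 then pvMakeTile inner size
  else
    List.replicate size.toNat border ::
      (List.replicate (size - 2).toNat
        (border :: (List.replicate (size - 2).toNat inner ++ [border])) ++
       [List.replicate size.toNat border])

-- ===== PRECONDITION & SPEC =====
def Spec_tile_border_py (inner : Int) (border : Int) (size : Int) (out : List (List Int)) : Prop := out = tile_border_py_alt inner border size
instance (inner : Int) (border : Int) (size : Int) (out : List (List Int)) : Decidable (Spec_tile_border_py inner border size out) := by unfold Spec_tile_border_py; infer_instance

-- ===== CLAIM (what is proved, stated in full; the proofs are below) =====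
def Claim_equal_tile_border_py : Prop := ∀ (inner : Int) (border : Int) (size : Int), Dom_tile_border_py inner border size → Spec_tile_border_py inner border size (tile_border_py inner border size)

-- ===== LEMMAS AND PROOFS =====

-- appending-fold is a map
theorem pv_foldl_append_map {α β : Type} (f : α → β) (l : List α) (init : List β) :
    l.foldl (fun acc x => acc ++ [f x]) init = init ++ l.map f := by
  induction l generalizing init with
  | nil => simp
  | cons a l ih => simp [ih]

-- the shared shape: first/last position gets b, the middle gets i
theorem pv_border_shape {α : Type} (n : ℕ) (hn : 2 ≤ n) (b i : α) :
    (List.range n).map (fun k => if k = 0 ∨ k = n - 1 then b else i)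
      = b :: (List.replicate (n - 2) i ++ [b]) := by
  apply List.ext_getElem
  · simp; omega
  · intro j h1 h2
    simp only [List.getElem_map, List.getElem_range]
    have hjn : j < n := by simpa using h1
    by_cases hj0 : j = 0
    · subst hj0; simp
    · obtain ⟨j', rfl⟩ : ∃ j', j = j' + 1 := ⟨j - 1, by omega⟩
      rw [List.getElem_cons_succ]
      by_cases hmid : j' < n - 2
      · rw [List.getElem_append_left (by simpa using hmid), List.getElem_replicate,
          if_neg (by omega)]
      · have hj : j' + 1 = n - 1 := by omega
        rw [List.getElem_append_right (by simpa using hmid)]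
        simp only [List.getElem_singleton]
        rw [if_pos (Or.inr hj)]

theorem pv_main (inner border size : Int) :
    tile_border_py inner border size = tile_border_py_alt inner border size := by
  unfold tile_border_py tile_border_py_alt
  by_cases hs : size ≤ 2
  · simp [hs]
  · simp only [hs, if_false]
    obtain ⟨n, rfl, hn3⟩ : ∃ n : ℕ, size = (n : Int) ∧ 3 ≤ n :=
      ⟨size.toNat, by omega, by omega⟩
    rw [PySem.List.pyRange_one, pv_foldl_append_map]
    simp only [List.nil_append, sub_zero, zero_add, Int.toNat_natCast, List.map_map]
    rw [show ((n : Int) - 2).toNat = n - 2 by omega]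
    rw [← pv_border_shape n (by omega) (List.replicate n border)
        (border :: (List.replicate (n - 2) inner ++ [border]))]
    apply List.map_congr_left
    intro k hk
    rw [List.mem_range] at hk
    simp only [Function.comp_apply]
    rw [pv_foldl_append_map]
    simp only [List.nil_append, List.map_map]
    by_cases hk0 : k = 0 ∨ k = n - 1
    · rw [if_pos hk0]
      have hcond : (k : Int) = 0 ∨ (k : Int) = (n : Int) - 1 := by omega
      rcases hcond with h | h <;> simp [h, Function.comp_def, List.map_const']
    · rw [if_neg hk0]
      have h1 : (k : Int) ≠ 0 := by omega
      have h2 : (k : Int) ≠ (n : Int) - 1 := by omega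
      rw [← pv_border_shape n (by omega) border inner]
      apply List.map_congr_left
      intro c hc
      rw [List.mem_range] at hc
      simp only [Function.comp_apply, h1, h2, false_or]
      by_cases hcc : c = 0 ∨ c = n - 1
      · have hci : (c : Int) = 0 ∨ (c : Int) = (n : Int) - 1 := by omega
        rcases hci with h | h <;> simp [h, hcc]
      · rw [if_neg (show ¬((c : Int) = 0 ∨ (c : Int) = (n : Int) - 1) by omega),
          if_neg hcc]

-- ===== VERDICT (by name: the statement is the Claim_ definition above) =====
theorem tile_border_py_spec : Claim_equal_tile_border_py := by
  intro inner border size _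
  exact pv_main inner border size
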